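-- pv_equiv track=rewrite | github.com/CodelineAtyab/OrbitXO | examples/from_tufool/Final_project/app.py | convert_measurements
-- ===== SOURCE A (Python) =====
-- from typing import List
--
-- def convert_measurements(s: str) -> List[int]:
--     def letter_value(ch):
--         if 'a' <= ch <= 'z':
--             return ord(ch) - ord('a') + 1
--         return 0
--
--     def consume_z(i):
--         z_count, n = 0, len(s)
--         while i < n and s[i] == 'z':
--             z_count += 1
--             i += 1
--         j = i
--         while j < n and not ('a' <= s[j] <= 'z'):
--             j += 1
--         if j < n and 'a' <= s[j] <= 'z':
--             val = 26 * z_count + letter_value(s[j])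
--             return val, j + 1
--         else:
--             return 26 * z_count, j
--
--     i, n, result = 0, len(s), []
--     while i < n:
--         ch = s[i]
--         if ch == 'z':
--             count, i = consume_z(i)
--         elif 'a' <= ch <= 'z':
--             count = letter_value(ch)
--             i += 1
--         else:
--             result.append(0)
--             i += 1
--             continue
--
--         total, taken = 0, 0
--         while taken < count and i < n:
--             if s[i] == 'z':
--                 val, i = consume_z(i)
--             else:
--                 val = letter_value(s[i])
--                 i += 1
--             total += val
--             taken += 1
--         result.append(total)
--     return result
-- ===== SOURCE B (Python) =====
-- from typing import List
--
-- def convert_measurements(s: str) -> List[int]: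
--     def letter_value(ch):
--         if 'a' <= ch <= 'z':
--             return ord(ch) - ord('a') + 1
--         return 0
--
--     def consume_z(i):
--         z_count, n = 0, len(s)
--         while i < n and s[i] == 'z':
--             z_count += 1
--             i += 1
--         j = i
--         while j < n and not ('a' <= s[j] <= 'z'):
--             j += 1
--         if j < n and 'a' <= s[j] <= 'z':
--             val = 26 * z_count + letter_value(s[j])
--             return val, j + 1
--         else:
--             return 26 * z_count, j
--
--     # Phase 1: tokenize the whole string into cells (value, is_bare)
--     cells = []
--     i, n = 0, len(s)
--     while i < n:
--         ch = s[i]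
--         if ch == 'z':
--             v, i = consume_z(i)
--             cells.append((v, False))
--         elif 'a' <= ch <= 'z':
--             cells.append((letter_value(ch), False))
--             i += 1
--         else:
--             cells.append((0, True))
--             i += 1
--
--     # Phase 2: consume the cell list
--     result = []
--     p, m = 0, len(cells)
--     while p < m:
--         v, bare = cells[p]
--         p += 1
--         if bare:
--             result.append(0)
--         else:
--             total, taken = 0, 0
--             while taken < v and p < m:
--                 total += cells[p][0]
--                 p += 1
--                 taken += 1
--             result.append(total)
--     return result
-- ===== Notes on version B (the rewrite author's own statement) =====
-- stated objective: alternative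
-- what changed: Replaces A's single interleaved scan (outer loop with a nested summing loop over raw characters) by a two-phase decomposition: one pass tokenizes the whole string into a flat list of (value, is_bare) cells, then a second pass consumes that cell list, summing the next `count` cell values per non-bare cell.
import Mathlib
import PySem

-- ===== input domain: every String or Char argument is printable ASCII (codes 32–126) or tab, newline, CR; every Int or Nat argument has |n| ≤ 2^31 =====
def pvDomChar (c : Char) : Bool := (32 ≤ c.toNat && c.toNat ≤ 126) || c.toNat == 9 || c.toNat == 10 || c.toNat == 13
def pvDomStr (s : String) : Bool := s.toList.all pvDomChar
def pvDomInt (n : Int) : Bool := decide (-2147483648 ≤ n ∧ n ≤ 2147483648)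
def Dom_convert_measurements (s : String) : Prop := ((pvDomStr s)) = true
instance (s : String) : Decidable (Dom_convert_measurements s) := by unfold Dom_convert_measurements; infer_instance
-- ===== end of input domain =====

-- B tokenizes the whole string once into a flat cell list and then consumes that list; same return value by a different decomposition (objective: alternative).

-- ===== PORT A =====
-- helpers of A: letter_value and consume_z (consume_z is reused by B's tokenizer, as in Source B)
def letterValue (c : Char) : Int :=
  if 'a' ≤ c ∧ c ≤ 'z' then (c.toNat : Int) - 97 + 1 else 0

-- first while of consume_z: count leading 'z's (loop over the suffix)
def czCountZ : List Char → Nat × List Char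
  | [] => (0, [])
  | c :: r => if c = 'z' then ((czCountZ r).1 + 1, (czCountZ r).2) else (0, c :: r)

-- second while of consume_z: skip non-letters
def czSkip : List Char → List Char
  | [] => []
  | c :: r => if ¬ ('a' ≤ c ∧ c ≤ 'z') then czSkip r else c :: r

def consumeZ (l : List Char) : Int × List Char :=
  match czSkip (czCountZ l).2 with
  | c :: r => (26 * ((czCountZ l).1 : Int) + letterValue c, r)
  | [] => (26 * ((czCountZ l).1 : Int), [])

theorem czCountZ_len (l : List Char) : (czCountZ l).2.length ≤ l.length := by
  induction l with
  | nil => simp [czCountZ]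
  | cons c r ih =>
    simp only [czCountZ]
    split
    · simp
      omega
    · simp

theorem czSkip_len (l : List Char) : (czSkip l).length ≤ l.length := by
  induction l with
  | nil => simp [czSkip]
  | cons c r ih =>
    simp only [czSkip]
    split
    · simp
      omega
    · simp

theorem consumeZ_len_z (r : List Char) : (consumeZ ('z' :: r)).2.length < r.length + 1 := by
  have h3 : (czSkip (czCountZ r).2).length ≤ r.length :=
    le_trans (czSkip_len (czCountZ r).2) (czCountZ_len r)
  simp only [consumeZ, czCountZ, if_true]
  split <;> rename_i heq
  · rw [heq] at h3; simp at h3; simp; omega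
  · simp

-- inner while loop of A (count, taken, total carried as in the Python)
def innerLoop (count taken total : Int) (l : List Char) : Int × List Char :=
  if h : taken < count ∧ l ≠ [] then
    match l, h with
    | c :: r, _ =>
      if c = 'z' then
        innerLoop count (taken + 1) (total + (consumeZ (c :: r)).1) (consumeZ (c :: r)).2
      else
        innerLoop count (taken + 1) (total + letterValue c) r
  else (total, l)
termination_by l.length
decreasing_by
  · rename_i hcz; subst hcz; simpa using consumeZ_len_z r
  · simp

theorem innerLoop_len (count taken total : Int) (l : List Char) :
    (innerLoop count taken total l).2.length ≤ l.length := by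
  fun_induction innerLoop count taken total l with
  | case1 taken total r h ih =>
    exact le_of_lt (lt_of_le_of_lt ih (consumeZ_len_z r))
  | case2 taken total c r h hz ih => exact le_trans ih (by simp)
  | case3 => simp

-- outer while loop of A
def outerLoop (l : List Char) : List Int :=
  match l with
  | [] => []
  | c :: r =>
    if c = 'z' then
      (innerLoop (consumeZ (c :: r)).1 0 0 (consumeZ (c :: r)).2).1 ::
        outerLoop (innerLoop (consumeZ (c :: r)).1 0 0 (consumeZ (c :: r)).2).2
    else if 'a' ≤ c ∧ c ≤ 'z' then
      (innerLoop (letterValue c) 0 0 r).1 :: outerLoop (innerLoop (letterValue c) 0 0 r).2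
    else
      0 :: outerLoop r
termination_by l.length
decreasing_by
  · rename_i hcz; subst hcz
    have h2 := innerLoop_len (consumeZ ('z' :: r)).1 0 0 (consumeZ ('z' :: r)).2
    have h1 := consumeZ_len_z r
    simp only [List.length_cons]; omega
  · have h2 := innerLoop_len (letterValue c) 0 0 r
    simp only [List.length_cons]; omega
  · simp

def convert_measurements (s : String) : List Int := outerLoop s.toList

-- ===== PORT B =====
-- phase 1 of B: tokenize the whole string into cells (value, is_bare); reuses consumeZ like Source B
def tokenize (l : List Char) : List (Int × Bool) :=
  match l with
  | [] => []
  | c :: r =>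
    if c = 'z' then
      ((consumeZ (c :: r)).1, false) :: tokenize (consumeZ (c :: r)).2
    else if 'a' ≤ c ∧ c ≤ 'z' then
      (letterValue c, false) :: tokenize r
    else
      (0, true) :: tokenize r
termination_by l.length
decreasing_by
  · rename_i hcz; subst hcz; simpa using consumeZ_len_z r
  · simp
  · simp

-- inner loop of phase 2: sum the values of the next `count` cells
def sumTake (count : Int) (cells : List (Int × Bool)) : Int × List (Int × Bool) :=
  if 0 < count then
    match cells with
    | [] => (0, [])
    | x :: r => ((sumTake (count - 1) r).1 + x.1, (sumTake (count - 1) r).2)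
  else (0, cells)
termination_by cells.length
decreasing_by simp

theorem sumTake_len (count : Int) (cells : List (Int × Bool)) :
    (sumTake count cells).2.length ≤ cells.length := by
  fun_induction sumTake count cells with
  | case1 => simp
  | case2 count h x r ih => exact le_trans ih (by simp)
  | case3 => simp

-- phase 2 of B: consume the cell list
def consumeCells (cells : List (Int × Bool)) : List Int :=
  match cells with
  | [] => []
  | (v, bare) :: rest =>
    if bare then 0 :: consumeCells rest
    else (sumTake v rest).1 :: consumeCells (sumTake v rest).2
termination_by cells.length
decreasing_by
  · simp
  · have := sumTake_len v rest; simp only [List.length_cons]; omega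

def convert_measurements_alt (s : String) : List Int := consumeCells (tokenize s.toList)

-- ===== PRECONDITION & SPEC =====
def Spec_convert_measurements (s : String) (out : List Int) : Prop := out = convert_measurements_alt s
instance (s : String) (out : List Int) : Decidable (Spec_convert_measurements s out) := by unfold Spec_convert_measurements; infer_instance

-- ===== CLAIM (what is proved, stated in full; the proofs are below) =====
def Claim_equal_convert_measurements : Prop := ∀ (s : String), Dom_convert_measurements s → Spec_convert_measurements s (convert_measurements s)

-- ===== LEMMAS AND PROOFS =====

-- A's inner loop returns total plus the sumTake of count-taken cells of the token
-- stream, and leaves a remainder whose token stream is sumTake's remainder.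
theorem inner_eq (count taken total : Int) (l : List Char) :
    (innerLoop count taken total l).1 = total + (sumTake (count - taken) (tokenize l)).1 ∧
    tokenize (innerLoop count taken total l).2 = (sumTake (count - taken) (tokenize l)).2 := by
  fun_induction innerLoop count taken total l with
  | case1 taken total r h ih =>
    rw [tokenize, if_pos rfl]
    rw [sumTake, if_pos (by omega)]
    have e : count - (taken + 1) = count - taken - 1 := by ring
    rw [e] at ih
    exact ⟨by rw [ih.1]; ring, ih.2⟩
  | case2 taken total c r h hz ih =>
    have e : count - (taken + 1) = count - taken - 1 := by ring
    rw [e] at ih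
    by_cases hl : 'a' ≤ c ∧ c ≤ 'z'
    · rw [tokenize, if_neg hz, if_pos hl]
      rw [sumTake, if_pos (by omega)]
      exact ⟨by rw [ih.1]; ring, ih.2⟩
    · rw [tokenize, if_neg hz, if_neg hl]
      rw [sumTake, if_pos (by omega)]
      have hv : letterValue c = 0 := by simp [letterValue, hl]
      simp only [hv] at ih ⊢
      refine ⟨?_, by simpa using ih.2⟩
      rw [ih.1]; ring
  | case3 taken total l h =>
    by_cases hc : taken < count
    · have hl : l = [] := by
        by_contra hne
        exact h ⟨hc, hne⟩
      subst hl
      simp only [tokenize]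
      rw [sumTake.eq_def]
      split <;> simp
    · rw [sumTake.eq_def, if_neg (by omega)]
      simp

-- A's outer loop equals B: consume the token stream of the remaining chars.
theorem outer_eq (l : List Char) : outerLoop l = consumeCells (tokenize l) := by
  fun_induction outerLoop l with
  | case1 => simp [tokenize, consumeCells]
  | case2 r ih =>
    rw [tokenize, if_pos rfl, consumeCells]
    have h := inner_eq (consumeZ ('z' :: r)).1 0 0 (consumeZ ('z' :: r)).2
    simp only [sub_zero, zero_add] at h
    simp only [Bool.false_eq_true, if_neg (by simp : ¬ False)]
    rw [h.1, ih, h.2]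
  | case3 c r hz hl ih =>
    rw [tokenize, if_neg hz, if_pos hl, consumeCells]
    have h := inner_eq (letterValue c) 0 0 r
    simp only [sub_zero, zero_add] at h
    simp only [Bool.false_eq_true, if_neg (by simp : ¬ False)]
    rw [h.1, ih, h.2]
  | case4 c r hz hl ih =>
    rw [tokenize, if_neg hz, if_neg hl, consumeCells]
    simp [ih]

-- ===== VERDICT (by name: the statement is the Claim_ definition above) =====
theorem convert_measurements_spec : Claim_equal_convert_measurements := by
  intro s _
  unfold Spec_convert_measurements convert_measurements convert_measurements_alt
  exact outer_eq s.toList
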